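-- pv_equiv track=rewrite | github.com/jayalath-jknr/invoice-automation | src/processing/vendor_identifier.py | normalize_item_block
-- ===== SOURCE A (Python) =====
-- def normalize_item_block(block: str) -> str:
--     lines = block.splitlines()
--
--     new_lines = []
--     removed = False
--
--     for line in lines:
--         if not removed and line.strip():
--             removed = True
--             continue
--         new_lines.append(line)
--
--     return "\n".join(new_lines)
-- ===== SOURCE B (Python) =====
-- def normalize_item_block(block: str) -> str:
--     def without_first_nonblank(lines):
--         if not lines:
--             return []
--         head, *rest = lines
--         if head.strip():
--             return rest
--         return [head] + without_first_nonblank(rest)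
--
--     return "\n".join(without_first_nonblank(block.splitlines()))
-- ===== Notes on version B (the rewrite author's own statement) =====
-- stated objective: alternative
-- what changed: Replaces A's imperative flag-and-continue accumulator loop with a recursive structural decomposition on the line list: a helper returns the tail when the head is non-blank and otherwise cons-es the head onto the recursive result.
import Mathlib
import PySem

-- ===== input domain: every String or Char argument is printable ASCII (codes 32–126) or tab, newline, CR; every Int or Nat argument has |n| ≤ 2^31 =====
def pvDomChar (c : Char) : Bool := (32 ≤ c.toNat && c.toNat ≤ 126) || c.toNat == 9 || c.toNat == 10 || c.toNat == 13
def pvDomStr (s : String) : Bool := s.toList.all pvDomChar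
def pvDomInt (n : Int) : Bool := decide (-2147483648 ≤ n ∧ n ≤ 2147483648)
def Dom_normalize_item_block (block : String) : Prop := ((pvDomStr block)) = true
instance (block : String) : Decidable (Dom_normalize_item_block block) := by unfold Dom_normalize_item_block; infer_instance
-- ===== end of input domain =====

-- B removes the first non-blank line by a recursive structural decomposition on the line list instead of A's flag-and-continue accumulator loop (objective: alternative).


-- ===== PORT A =====
def normalize_item_block (block : String) : String :=
  let lines := PySem.Str.splitlines block
  let st := lines.foldl
    (fun (st : Bool × List String) line =>
      if !st.1 && (PySem.Str.strip line != "") then (true, st.2)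
      else (st.1, st.2 ++ [line]))
    (false, [])
  PySem.Str.join "\n" st.2

-- ===== PORT B =====
def withoutFirstNonblank : List String → List String
  | [] => []
  | head :: rest =>
    if PySem.Str.strip head != "" then rest
    else head :: withoutFirstNonblank rest

def normalize_item_block_alt (block : String) : String :=
  PySem.Str.join "\n" (withoutFirstNonblank (PySem.Str.splitlines block))

-- ===== PRECONDITION & SPEC =====
def Spec_normalize_item_block (block : String) (out : String) : Prop := out = normalize_item_block_alt block
instance (block : String) (out : String) : Decidable (Spec_normalize_item_block block out) := by unfold Spec_normalize_item_block; infer_instance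

-- ===== CLAIM (what is proved, stated in full; the proofs are below) =====
def Claim_equal_normalize_item_block : Prop := ∀ (block : String), Dom_normalize_item_block block → Spec_normalize_item_block block (normalize_item_block block)

-- ===== LEMMAS AND PROOFS =====

theorem foldl_removed (lines acc : List String) :
    (lines.foldl
      (fun (st : Bool × List String) line =>
        if !st.1 && (PySem.Str.strip line != "") then (true, st.2)
        else (st.1, st.2 ++ [line]))
      (true, acc)) = (true, acc ++ lines) := by
  induction lines generalizing acc with
  | nil => simp
  | cons l ls ih =>
    rw [List.foldl_cons, if_neg (by simp), ih]
    simp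

theorem foldl_not_removed (lines : List String) (acc : List String) :
    (lines.foldl
      (fun (st : Bool × List String) line =>
        if !st.1 && (PySem.Str.strip line != "") then (true, st.2)
        else (st.1, st.2 ++ [line]))
      (false, acc)).2 = acc ++ withoutFirstNonblank lines := by
  induction lines generalizing acc with
  | nil => simp [withoutFirstNonblank]
  | cons l ls ih =>
    rw [List.foldl_cons]
    by_cases h : (PySem.Str.strip l != "") = true
    · rw [if_pos (by simp [h]), foldl_removed]
      simp [withoutFirstNonblank, h]
    · rw [if_neg (by simp [h]), ih]
      simp [withoutFirstNonblank, h]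

-- ===== VERDICT (by name: the statement is the Claim_ definition above) =====
theorem normalize_item_block_spec : Claim_equal_normalize_item_block := by
  intro block _
  unfold Spec_normalize_item_block normalize_item_block normalize_item_block_alt
  simp only [foldl_not_removed, List.nil_append]
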